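-- pv_equiv track=rewrite | github.com/ArsonBeelzebufo/SVGDesmos | main.py | explicitify
-- ===== SOURCE A (Python) =====
-- def add(a,b): #a,b: str, used to avoid floating point error (hopefully)
--     nega,negb=('-' in a),('-' in b)
--     a,b=a[1*nega:],b[1*negb:]
--     if '.' not in a:
--         a+='.'
--     if '.' not in b:
--         b+='.'
--     idxa,idxb=a.index('.'),b.index('.')
--     La,Lb=len(a),len(b)
--     a,b=a[:idxa]+a[idxa+1:],b[:idxb]+b[idxb+1:]
--     if idxa<idxb:
--         idx=idxb
--         a='0'*(idxb-idxa)+a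
--     else:
--         idx=idxa
--         b='0'*(idxa-idxb)+b
--     if La-idxa<Lb-idxb:
--         a+='0'*(Lb-La+idxa-idxb)
--     else:
--         b+='0'*(La-Lb+idxb-idxa)
--     L=len(a)
--     pow=idx-L
--     A,B=[int(i)*(-2*nega+1) for i in a],[int(i)*(-2*negb+1) for i in b]
--     S=str(sum([(A[i]+B[i])*10**(L-i-1) for i in range(L)]))
--     neg='-' in S
--     if neg:
--         S=S[1:]
--     S=S[:pow]+'.'+S[pow:]
--     if neg:
--         S='-'+S
--     return S
--
-- def explicitify(pairs):
--     res=[pairs[0][:]]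
--     pairs=pairs[1:]
--     ans=[]
--     for pair in pairs:
--         ans.append(pair[:])
--         if len(ans)==3:
--             for an in ans:
--                 an[0]=add(an[0],res[-1][0])
--                 an[1]=add(an[1],res[-1][1])
--             res+=ans[:]
--             ans=[]
--     return res
-- ===== SOURCE B (Python) =====
-- def add(a, b):
--     # exact decimal-string addition via integer arithmetic:
--     # parse each operand into sign / integer part / fraction part,
--     # scale both to a common power of ten, add as Python ints, re-insert the dot.
--     def parse(s):
--         neg = '-' in s
--         if neg:
--             s = s[1:]
--         ip, _, fp = s.partition('.')
--         return (-1 if neg else 1), ip, fp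
--     sa, ia, fa = parse(a)
--     sb, ib, fb = parse(b)
--     f = max(len(fa), len(fb))
--     total = sa * int((ia + fa.ljust(f, '0')) or '0') \
--           + sb * int((ib + fb.ljust(f, '0')) or '0')
--     S = str(abs(total))
--     res = S[:-f] + '.' + S[-f:]
--     return '-' + res if total < 0 else res
--
-- def explicitify(pairs):
--     def go(rest, base):
--         if len(rest) < 3:
--             return []
--         triple = [[add(p[0], base[0]), add(p[1], base[1])] + p[2:] for p in rest[:3]]
--         return triple + go(rest[3:], triple[2])
--     return [pairs[0][:]] + go(pairs[1:], pairs[0])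
-- ===== Notes on version B (the rewrite author's own statement) =====
-- stated objective: alternative
-- what changed: add() is re-implemented with integer arithmetic (parse sign/integer/fraction, scale to a common power of ten, add as Python ints, re-insert the dot into str(abs(total))) instead of A's zero-padded per-digit weighted column sum, and the grouping loop becomes recursion over chunks of three with an explicit base pair instead of A's append-until-len==3 buffer with a res[-1] back-reference.
-- outside the precondition, e.g. on explicitify([]): A raises IndexError, B raises IndexError; on explicitify([['x', '0'], ['1', '1'], ['2', '2'], ['3', '3']]): A raises ValueError, B raises ValueError
import Mathlib
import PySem

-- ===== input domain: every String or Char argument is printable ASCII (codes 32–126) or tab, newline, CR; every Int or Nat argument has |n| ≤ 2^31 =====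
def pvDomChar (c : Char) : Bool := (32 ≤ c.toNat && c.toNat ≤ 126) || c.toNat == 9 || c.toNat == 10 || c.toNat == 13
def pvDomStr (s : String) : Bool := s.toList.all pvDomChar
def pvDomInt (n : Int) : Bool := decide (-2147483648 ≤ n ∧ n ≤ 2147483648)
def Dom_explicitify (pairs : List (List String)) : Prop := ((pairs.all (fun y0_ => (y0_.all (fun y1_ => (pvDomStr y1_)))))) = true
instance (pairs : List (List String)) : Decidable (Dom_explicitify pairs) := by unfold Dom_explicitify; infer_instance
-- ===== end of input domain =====

-- B replaces A's digit-weighted column addition of padded strings and its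
-- append-until-len==3 buffer loop by a different algorithm: each decimal string is
-- parsed into sign / integer part / fraction part, both operands are scaled to a
-- common power of ten and added as plain integers, and the dot is re-inserted into
-- str(abs(total)); the grouping loop becomes recursion over chunks of three with an
-- explicit base argument (objective: alternative; same asymptotic cost).

-- ===== PORT A =====
-- helper add(a,b): exact decimal-string addition by per-digit weighted sum.
-- Ported step for step over List Char.
-- int(i) for a single char is ported as c.toNat - 48: exact when c is a digit; on a
-- non-digit Python raises ValueError — those inputs are excluded by Pre_.
def pvDigit (c : Char) : Int := (c.toNat : Int) - 48

def pvAdd (a0 b0 : String) : String :=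
  let nega := a0.toList.contains '-'
  let negb := b0.toList.contains '-'
  let a1 := if nega then a0.toList.drop 1 else a0.toList
  let b1 := if negb then b0.toList.drop 1 else b0.toList
  let a2 := if a1.contains '.' then a1 else a1 ++ ['.']
  let b2 := if b1.contains '.' then b1 else b1 ++ ['.']
  let idxa := a2.idxOf '.'
  let idxb := b2.idxOf '.'
  let La := a2.length
  let Lb := b2.length
  let a3 := a2.take idxa ++ a2.drop (idxa + 1)
  let b3 := b2.take idxb ++ b2.drop (idxb + 1)
  let idx := if idxa < idxb then idxb else idxa
  let a4 := if idxa < idxb then List.replicate (idxb - idxa) '0' ++ a3 else a3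
  let b4 := if idxa < idxb then b3 else List.replicate (idxa - idxb) '0' ++ b3
  -- '0'*(Lb-La+idxa-idxb): Python repeats max 0 times for a negative count = Int.toNat
  let a5 := if (La : Int) - idxa < (Lb : Int) - idxb then
              a4 ++ List.replicate ((Lb : Int) - La + idxa - idxb).toNat '0' else a4
  let b5 := if (La : Int) - idxa < (Lb : Int) - idxb then
              b4 else b4 ++ List.replicate ((La : Int) - Lb + idxb - idxa).toNat '0'
  let L := a5.length
  let pw : Int := (idx : Int) - L
  let A := a5.map (fun c => pvDigit c * (-2 * (if nega then (1 : Int) else 0) + 1))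
  let B := b5.map (fun c => pvDigit c * (-2 * (if negb then (1 : Int) else 0) + 1))
  let s := (List.range L).foldl (fun acc i => acc + (A.getD i 0 + B.getD i 0) * 10 ^ (L - i - 1)) 0
  let S0 := PySem.Int.toChars s
  let neg := S0.contains '-'
  let S1 := if neg then S0.drop 1 else S0
  let S2 := PySem.List.slice S1 none (some pw) ++ ['.'] ++ PySem.List.slice S1 (some pw) none
  String.ofList (if neg then '-' :: S2 else S2)

-- an[0]=add(an[0],base[0]); an[1]=add(an[1],base[1]).  A list with fewer than two
-- elements makes Python raise IndexError (excluded by Pre_); the fallback returns it unchanged.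
def pvOffset (base : List String) (an : List String) : List String :=
  match an with
  | x :: y :: t => pvAdd x (base.getD 0 "") :: pvAdd y (base.getD 1 "") :: t
  | short => short

def pvStepA (st : List (List String) × List (List String)) (pair : List String) :
    List (List String) × List (List String) :=
  let ans := st.2 ++ [pair]
  if ans.length == 3 then (st.1 ++ ans.map (pvOffset (st.1.getLastD [])), [])
  else (st.1, ans)

def explicitify (pairs : List (List String)) : List (List String) :=
  match pairs with
  | [] => []   -- pairs[0] raises IndexError on an empty list; excluded by Pre_
  | p :: rest => (rest.foldl pvStepA ([p], [])).1

-- ===== PORT B =====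
-- B's add: parse sign / integer digits / fraction digits, scale to a common power of
-- ten, add as integers, re-insert the dot into str(abs(total)).
-- parse(s): neg flag, then s.partition('.') on the sign-stripped string.
def pvParse (s : String) : Int × List Char × List Char :=
  let neg := s.toList.contains '-'
  let t := if neg then s.toList.drop 1 else s.toList
  if t.contains '.' then
    ((if neg then -1 else 1), t.take (t.idxOf '.'), t.drop (t.idxOf '.' + 1))
  else ((if neg then -1 else 1), t, [])

-- int(s or '0') on a digit-only string (guaranteed by Pre_): positional fold; exact
-- there, and ''.foldl = 0 matches int('' or '0') = 0.
def pvIntDigits (l : List Char) : Int := l.foldl (fun a c => a * 10 + pvDigit c) 0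

def pvAddB (a b : String) : String :=
  let pa := pvParse a
  let pb := pvParse b
  let f := max pa.2.2.length pb.2.2.length
  -- fa.ljust(f, '0')
  let da := pa.2.1 ++ (pa.2.2 ++ List.replicate (f - pa.2.2.length) '0')
  let db := pb.2.1 ++ (pb.2.2 ++ List.replicate (f - pb.2.2.length) '0')
  let total := pa.1 * pvIntDigits da + pb.1 * pvIntDigits db
  let S := PySem.Int.toChars ((total.natAbs : Int))   -- str(abs(total))
  let res := PySem.List.slice S none (some (-(f : Int))) ++ ['.'] ++
             PySem.List.slice S (some (-(f : Int))) none
  String.ofList (if total < 0 then '-' :: res else res)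

-- [add(p[0], base[0]), add(p[1], base[1])] + p[2:]; p[0]/p[1]/base[0]/base[1] raise
-- IndexError on lists shorter than two — excluded by Pre_ (getD default never read there).
def pvOffsetB (base : List String) (p : List String) : List String :=
  [pvAddB (p.getD 0 "") (base.getD 0 ""), pvAddB (p.getD 1 "") (base.getD 1 "")] ++ p.drop 2

def pvGo (rest : List (List String)) (base : List String) : List (List String) :=
  if rest.length < 3 then []
  else
    let triple := (rest.take 3).map (pvOffsetB base)
    triple ++ pvGo (rest.drop 3) (triple.getD 2 [])
termination_by rest.length
decreasing_by simp; omega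

def explicitify_alt (pairs : List (List String)) : List (List String) :=
  match pairs with
  | [] => []   -- pairs[0] raises IndexError on an empty list; excluded by Pre_
  | p :: rest => p :: pvGo rest p

-- ===== PRECONDITION & SPEC =====
-- a string add() accepts without raising: after stripping one leading char when '-' occurs,
-- only digits and at most one '.'
def pvValidStr (s : String) : Bool :=
  let t := if s.toList.contains '-' then s.toList.drop 1 else s.toList
  decide (t.count '.' ≤ 1) && t.all (fun c => c.isDigit || c == '.')

def pvOkPair (p : List String) : Bool :=
  decide (2 ≤ p.length) && pvValidStr (p.getD 0 "") && pvValidStr (p.getD 1 "")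

-- Pre_ excludes exactly the inputs where A raises: the empty list (IndexError), and a
-- first pair or a pair inside a complete group of three that is shorter than two entries
-- (IndexError) or whose first two strings add() cannot parse (ValueError).
def Pre_explicitify (pairs : List (List String)) : Prop :=
  pairs ≠ [] ∧
  (4 ≤ pairs.length → pvOkPair (pairs.getD 0 []) = true) ∧
  ∀ p ∈ (pairs.drop 1).take (3 * ((pairs.length - 1) / 3)), pvOkPair p = true

instance (pairs : List (List String)) : Decidable (Pre_explicitify pairs) := by
  unfold Pre_explicitify; infer_instance

def pvWitness_explicitify : List (List String) :=
  [["1", "2"], ["1", "1"], ["2", "2"], ["3", "3"]]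

def Spec_explicitify (pairs : List (List String)) (out : List (List String)) : Prop := out = explicitify_alt pairs
instance (pairs : List (List String)) (out : List (List String)) : Decidable (Spec_explicitify pairs out) := by unfold Spec_explicitify; infer_instance

-- ===== CLAIM (what is proved, stated in full; the proofs are below) =====
def Claim_equal_explicitify : Prop := ∀ (pairs : List (List String)), Dom_explicitify pairs → Pre_explicitify pairs → Spec_explicitify pairs (explicitify pairs)

-- ===== LEMMAS AND PROOFS =====

-- positional value of a digit list (the fold B uses)
theorem pv_foldl_val (l : List Char) (a : Int) :
    l.foldl (fun a c => a * 10 + pvDigit c) a = a * 10 ^ l.length + pvIntDigits l := by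
  induction l generalizing a with
  | nil => simp [pvIntDigits]
  | cons c t ih =>
    simp only [List.foldl_cons, pvIntDigits, List.length_cons]
    rw [ih (a * 10 + pvDigit c), ih (0 * 10 + pvDigit c)]
    ring

theorem pv_val_append (l1 l2 : List Char) :
    pvIntDigits (l1 ++ l2) = pvIntDigits l1 * 10 ^ l2.length + pvIntDigits l2 := by
  simpa [pvIntDigits, List.foldl_append] using pv_foldl_val l2 (pvIntDigits l1)

theorem pv_val_zeros (k : Nat) : pvIntDigits (List.replicate k '0') = 0 := by
  induction k with
  | zero => rfl
  | succ n ih =>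
    rw [List.replicate_succ]
    simpa [pvIntDigits, pvDigit, List.foldl_cons] using ih

theorem pv_val_zeros_append (k : Nat) (l : List Char) :
    pvIntDigits (List.replicate k '0' ++ l) = pvIntDigits l := by
  rw [pv_val_append, pv_val_zeros]; ring

-- sum over range with + is a list sum
theorem pv_foldl_range_add (L : Nat) (F : Nat → Int) :
    (List.range L).foldl (fun acc i => acc + F i) 0 = ((List.range L).map F).sum := by
  induction L with
  | zero => rfl
  | succ n ih =>
    rw [List.range_succ]
    simp [List.foldl_append, List.map_append, ih]

-- A's weighted column sum equals sign * positional value, one list at a time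
theorem pv_weighted_sum (l : List Char) (sgn : Int) :
    ((List.range l.length).map
      (fun i => (l.map (fun c => pvDigit c * sgn)).getD i 0 * 10 ^ (l.length - i - 1))).sum
      = sgn * pvIntDigits l := by
  induction l using List.reverseRecOn with
  | nil => simp [pvIntDigits]
  | append_singleton t c ih =>
    have hlen : (t ++ [c]).length = t.length + 1 := by simp
    rw [hlen, List.range_succ, List.map_append, List.sum_append]
    have hlast : ((t ++ [c]).map (fun c => pvDigit c * sgn)).getD t.length 0
        = pvDigit c * sgn := by
      simp [List.map_append]
    have hpre : ∀ i ∈ List.range t.length,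
        ((t ++ [c]).map (fun c => pvDigit c * sgn)).getD i 0 * 10 ^ (t.length + 1 - i - 1)
        = ((t.map (fun c => pvDigit c * sgn)).getD i 0 * 10 ^ (t.length - i - 1)) * 10 := by
      intro i hi
      rw [List.mem_range] at hi
      have h1 : ((t ++ [c]).map (fun c => pvDigit c * sgn)).getD i 0
          = (t.map (fun c => pvDigit c * sgn)).getD i 0 := by
        simp only [List.map_append, List.getD_eq_getElem?_getD, List.getElem?_append_left
          (by simpa using hi : i < (t.map (fun c => pvDigit c * sgn)).length)]
      have h2 : (10 : Int) ^ (t.length + 1 - i - 1) = 10 ^ (t.length - i - 1) * 10 := by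
        rw [← pow_succ]
        congr 1
        omega
      rw [h1, h2]; ring
    rw [List.map_congr_left hpre]
    have hmul : ∀ (m : List Int), (m.map (· * (10:Int))).sum = m.sum * 10 := by
      intro m; induction m with
      | nil => simp
      | cons x xs ihm => simp [ihm]; ring
    have := hmul ((List.range t.length).map
      (fun i => (t.map (fun c => pvDigit c * sgn)).getD i 0 * 10 ^ (t.length - i - 1)))
    rw [List.map_map] at this
    rw [show ((List.range t.length).map
        (fun i => (t.map (fun c => pvDigit c * sgn)).getD i 0 * 10 ^ (t.length - i - 1) * 10)).sum
        = ((List.range t.length).map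
        (fun i => (t.map (fun c => pvDigit c * sgn)).getD i 0 * 10 ^ (t.length - i - 1))).sum * 10
      from this]
    rw [ih]
    simp only [List.map_cons, List.map_nil, List.sum_cons, List.sum_nil, hlast]
    rw [pv_val_append]
    simp [pvIntDigits]
    ring

-- the combined column sum splits into the two weighted sums
theorem pv_sum_split (A B : List Int) (L : Nat) :
    ((List.range L).map (fun i => (A.getD i 0 + B.getD i 0) * 10 ^ (L - i - 1))).sum
      = ((List.range L).map (fun i => A.getD i 0 * 10 ^ (L - i - 1))).sum
        + ((List.range L).map (fun i => B.getD i 0 * 10 ^ (L - i - 1))).sum := by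
  induction List.range L with
  | nil => simp
  | cons x t ih => simp only [List.map_cons, List.sum_cons, ih]; ring

-- decimal digit characters of Nat.toDigits
theorem pv_toDigits_digits (f n : Nat) (l : List Char) (c : Char)
    (hc : c ∈ Nat.toDigitsCore 10 f n l) : c ∈ l ∨ c.isDigit := by
  have hdig : ∀ m : Nat, m < 10 → (Nat.digitChar m).isDigit = true := by decide
  induction f generalizing n l with
  | zero => exact Or.inl hc
  | succ f ih =>
    simp only [Nat.toDigitsCore] at hc
    split at hc
    · rcases List.mem_cons.1 hc with h | h
      · exact Or.inr (h ▸ hdig _ (Nat.mod_lt _ (by norm_num)))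
      · exact Or.inl h
    · rcases ih _ _ hc with h | h
      · rcases List.mem_cons.1 h with h' | h'
        · exact Or.inr (h' ▸ hdig _ (Nat.mod_lt _ (by norm_num)))
        · exact Or.inl h'
      · exact Or.inr h

theorem pv_toChars_neg_iff (n : Int) : (PySem.Int.toChars n).contains '-' = true ↔ n < 0 := by
  unfold PySem.Int.toChars
  split
  · rename_i h
    exact iff_of_true (by simp) h
  · rename_i h
    simp only [List.contains_eq_mem, decide_eq_true_eq]
    constructor
    · intro hm
      rcases pv_toDigits_digits _ _ _ _ hm with h' | h'
      · simp at h'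
      · simp [Char.isDigit] at h'
    · intro hlt; omega

-- proof-only helpers: both adds split their operand into sign / digits-before-dot /
-- digits-after-dot; these defs name the pieces.
def pvStrip (s : String) : List Char :=
  if s.toList.contains '-' then s.toList.drop 1 else s.toList

def pvDotted (t : List Char) : List Char := if t.contains '.' then t else t ++ ['.']

def pvIP (t : List Char) : List Char := if t.contains '.' then t.take (t.idxOf '.') else t

def pvFP (t : List Char) : List Char :=
  if t.contains '.' then t.drop (t.idxOf '.' + 1) else []

-- pvAdd from the point where a2/b2 (the dotted, sign-stripped operands) are fixed
def pvAddTail (nega negb : Bool) (a2 b2 : List Char) : String :=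
  let idxa := a2.idxOf '.'
  let idxb := b2.idxOf '.'
  let La := a2.length
  let Lb := b2.length
  let a3 := a2.take idxa ++ a2.drop (idxa + 1)
  let b3 := b2.take idxb ++ b2.drop (idxb + 1)
  let idx := if idxa < idxb then idxb else idxa
  let a4 := if idxa < idxb then List.replicate (idxb - idxa) '0' ++ a3 else a3
  let b4 := if idxa < idxb then b3 else List.replicate (idxa - idxb) '0' ++ b3
  let a5 := if (La : Int) - idxa < (Lb : Int) - idxb then
              a4 ++ List.replicate ((Lb : Int) - La + idxa - idxb).toNat '0' else a4
  let b5 := if (La : Int) - idxa < (Lb : Int) - idxb then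
              b4 else b4 ++ List.replicate ((La : Int) - Lb + idxb - idxa).toNat '0'
  let L := a5.length
  let pw : Int := (idx : Int) - L
  let A := a5.map (fun c => pvDigit c * (-2 * (if nega then (1 : Int) else 0) + 1))
  let B := b5.map (fun c => pvDigit c * (-2 * (if negb then (1 : Int) else 0) + 1))
  let s := (List.range L).foldl (fun acc i => acc + (A.getD i 0 + B.getD i 0) * 10 ^ (L - i - 1)) 0
  let S0 := PySem.Int.toChars s
  let neg := S0.contains '-'
  let S1 := if neg then S0.drop 1 else S0
  let S2 := PySem.List.slice S1 none (some pw) ++ ['.'] ++ PySem.List.slice S1 (some pw) none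
  String.ofList (if neg then '-' :: S2 else S2)

-- pvAddB from the point where the two parses are fixed
def pvAddBTail (sa sb : Int) (ia fa ib fb : List Char) : String :=
  let f := max fa.length fb.length
  let da := ia ++ (fa ++ List.replicate (f - fa.length) '0')
  let db := ib ++ (fb ++ List.replicate (f - fb.length) '0')
  let total := sa * pvIntDigits da + sb * pvIntDigits db
  let S := PySem.Int.toChars ((total.natAbs : Int))
  let res := PySem.List.slice S none (some (-(f : Int))) ++ ['.'] ++
             PySem.List.slice S (some (-(f : Int))) none
  String.ofList (if total < 0 then '-' :: res else res)

theorem pv_add_tail (a b : String) :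
    pvAdd a b = pvAddTail (a.toList.contains '-') (b.toList.contains '-')
      (pvDotted (pvStrip a)) (pvDotted (pvStrip b)) := rfl

theorem pv_addB_tail (a b : String) :
    pvAddB a b = pvAddBTail (pvParse a).1 (pvParse b).1 (pvParse a).2.1 (pvParse a).2.2
      (pvParse b).2.1 (pvParse b).2.2 := rfl

theorem pvParse_eq (s : String) :
    pvParse s = ((if s.toList.contains '-' then (-1 : Int) else 1),
      pvIP (pvStrip s), pvFP (pvStrip s)) := by
  simp only [pvParse, pvIP, pvFP, pvStrip]
  split <;> (split <;> simp)

theorem pv_dotted_decomp (t : List Char) : pvDotted t = pvIP t ++ '.' :: pvFP t := by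
  unfold pvDotted pvIP pvFP
  by_cases h : t.contains '.'
  · simp only [h, if_true]
    have hmem : '.' ∈ t := by simpa using h
    have hlt := List.idxOf_lt_length_of_mem hmem
    conv_lhs => rw [← List.take_append_drop (t.idxOf '.') t]
    rw [List.drop_eq_getElem_cons hlt, List.getElem_idxOf hlt]
  · have h' : '.' ∉ t := by simpa using h
    simp [h']

theorem pv_ip_no_dot (t : List Char) : '.' ∉ pvIP t := by
  unfold pvIP
  by_cases h : t.contains '.'
  · simp only [h, if_true]
    intro hmem
    have := (List.mem_take_iff_idxOf_lt (by simpa using h)).1 hmem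
    omega
  · simp only [h, Bool.false_eq_true, if_false]
    simpa using h

theorem pv_idxOf_dot (l l2 : List Char) (h : '.' ∉ l) :
    (l ++ '.' :: l2).idxOf '.' = l.length := by
  induction l with
  | nil => simp
  | cons c t ih =>
    simp only [List.mem_cons, not_or] at h
    simp [List.cons_append, Ne.symm h.1, ih h.2]

theorem pv_colsum (x y : List Char) (sx sy : Int) (hlen : y.length = x.length) :
    (List.range x.length).foldl (fun acc i => acc +
        ((x.map (fun c => pvDigit c * sx)).getD i 0 +
         (y.map (fun c => pvDigit c * sy)).getD i 0) * 10 ^ (x.length - i - 1)) 0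
      = sx * pvIntDigits x + sy * pvIntDigits y := by
  rw [pv_foldl_range_add, pv_sum_split]
  congr 1
  · exact pv_weighted_sum x sx
  · rw [← hlen]
    exact pv_weighted_sum y sy

theorem pv_drop_sign (s : Int) :
    (if (PySem.Int.toChars s).contains '-' then (PySem.Int.toChars s).drop 1
     else PySem.Int.toChars s) = PySem.Int.toChars ((s.natAbs : Int)) := by
  by_cases h : s < 0
  · have h0 : PySem.Int.toChars s = '-' :: Nat.toDigits 10 s.natAbs := by
      unfold PySem.Int.toChars; rw [if_pos h]
    rw [h0]
    have : (('-' : Char) :: Nat.toDigits 10 s.natAbs).contains '-' = true := by simp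
    rw [this, if_pos rfl]
    unfold PySem.Int.toChars
    rw [if_neg (by omega)]
    rw [List.drop_one, List.tail_cons, Int.toNat_natCast]
  · have hc : (PySem.Int.toChars s).contains '-' = false := by
      by_contra hcc
      exact h ((pv_toChars_neg_iff s).1 (by simpa using hcc))
    rw [hc, if_neg (by simp)]
    congr 1
    omega

theorem pv_format' (s pw s' pw' : Int) (hs : s = s') (hpw : pw = pw') :
    String.ofList
      (if (PySem.Int.toChars s).contains '-' then
        '-' :: (PySem.List.slice (if (PySem.Int.toChars s).contains '-' then
                  (PySem.Int.toChars s).drop 1 else PySem.Int.toChars s) none (some pw)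
          ++ ['.'] ++ PySem.List.slice (if (PySem.Int.toChars s).contains '-' then
                  (PySem.Int.toChars s).drop 1 else PySem.Int.toChars s) (some pw) none)
      else
        PySem.List.slice (if (PySem.Int.toChars s).contains '-' then
            (PySem.Int.toChars s).drop 1 else PySem.Int.toChars s) none (some pw)
          ++ ['.'] ++ PySem.List.slice (if (PySem.Int.toChars s).contains '-' then
            (PySem.Int.toChars s).drop 1 else PySem.Int.toChars s) (some pw) none)
    = String.ofList
      (if s' < 0 then
        '-' :: (PySem.List.slice (PySem.Int.toChars ((s'.natAbs : Int))) none (some pw')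
          ++ ['.'] ++ PySem.List.slice (PySem.Int.toChars ((s'.natAbs : Int))) (some pw') none)
      else
        PySem.List.slice (PySem.Int.toChars ((s'.natAbs : Int))) none (some pw')
          ++ ['.'] ++ PySem.List.slice (PySem.Int.toChars ((s'.natAbs : Int))) (some pw') none) := by
  subst hs hpw
  rw [pv_drop_sign]
  by_cases h : s < 0
  · rw [if_pos ((pv_toChars_neg_iff s).2 h), if_pos h]
  · rw [if_neg h, if_neg (by
      intro hcc
      exact h ((pv_toChars_neg_iff s).1 hcc))]

theorem pv_core (nega negb : Bool) (ia fa ib fb : List Char)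
    (hia : '.' ∉ ia) (hib : '.' ∉ ib) :
    pvAddTail nega negb (ia ++ '.' :: fa) (ib ++ '.' :: fb)
      = pvAddBTail (if nega then (-1 : Int) else 1) (if negb then (-1 : Int) else 1)
          ia fa ib fb := by
  simp only [pvAddTail, pvAddBTail]
  have hidxa : (ia ++ '.' :: fa).idxOf '.' = ia.length := pv_idxOf_dot ia fa hia
  have hidxb : (ib ++ '.' :: fb).idxOf '.' = ib.length := pv_idxOf_dot ib fb hib
  have htka : (ia ++ '.' :: fa).take ia.length = ia := List.take_left' rfl
  have htkb : (ib ++ '.' :: fb).take ib.length = ib := List.take_left' rfl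
  have hdra : (ia ++ '.' :: fa).drop (ia.length + 1) = fa := by
    rw [show ia ++ '.' :: fa = (ia ++ ['.']) ++ fa by simp]
    exact List.drop_left' (by simp)
  have hdrb : (ib ++ '.' :: fb).drop (ib.length + 1) = fb := by
    rw [show ib ++ '.' :: fb = (ib ++ ['.']) ++ fb by simp]
    exact List.drop_left' (by simp)
  have hLa : (ia ++ '.' :: fa).length = ia.length + (fa.length + 1) := by simp
  have hLb : (ib ++ '.' :: fb).length = ib.length + (fb.length + 1) := by simp
  have hsga : (-2 * (if nega then (1 : Int) else 0) + 1) = (if nega then (-1 : Int) else 1) := by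
    cases nega <;> norm_num
  have hsgb : (-2 * (if negb then (1 : Int) else 0) + 1) = (if negb then (-1 : Int) else 1) := by
    cases negb <;> norm_num
  simp only [hidxa, hidxb, htka, htkb, hdra, hdrb, hLa, hLb, hsga, hsgb]
  by_cases hii : ia.length < ib.length <;>
    by_cases hff : ((ia.length + (fa.length + 1) : Nat) : Int) - (ia.length : Int)
        < ((ib.length + (fb.length + 1) : Nat) : Int) - (ib.length : Int)
  · simp only [if_pos hii, if_pos hff]
    refine pv_format' _ _ _ _ ?_ ?_
    · refine (pv_colsum _ _ _ _ (by simp; omega)).trans ?_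
      have hk : (((ib.length + (fb.length + 1) : Nat) : Int) - ((ia.length + (fa.length + 1) : Nat) : Int)
          + (ia.length : Int) - (ib.length : Int)).toNat = fb.length - fa.length := by omega
      have hf1 : max fa.length fb.length - fa.length = fb.length - fa.length := by omega
      have hf2 : max fa.length fb.length - fb.length = 0 := by omega
      rw [hk, hf1, hf2]
      simp only [List.append_assoc, pv_val_zeros_append, pv_val_append, pv_val_zeros,
        List.length_replicate, List.replicate_zero, List.append_nil, List.length_append]
      ring
    · simp only [List.length_append, List.length_replicate, List.length_cons]
      omega
  · simp only [if_pos hii, if_neg hff]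
    refine pv_format' _ _ _ _ ?_ ?_
    · refine (pv_colsum _ _ _ _ (by simp; omega)).trans ?_
      have hk : (((ia.length + (fa.length + 1) : Nat) : Int) - ((ib.length + (fb.length + 1) : Nat) : Int)
          + (ib.length : Int) - (ia.length : Int)).toNat = fa.length - fb.length := by omega
      have hf1 : max fa.length fb.length - fa.length = 0 := by omega
      have hf2 : max fa.length fb.length - fb.length = fa.length - fb.length := by omega
      rw [hk, hf1, hf2]
      simp only [List.append_assoc, pv_val_zeros_append, pv_val_append, pv_val_zeros,
        List.length_replicate, List.replicate_zero, List.append_nil, List.length_append]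
      ring
    · simp only [List.length_append, List.length_replicate, List.length_cons]
      omega
  · simp only [if_neg hii, if_pos hff]
    refine pv_format' _ _ _ _ ?_ ?_
    · refine (pv_colsum _ _ _ _ (by simp; omega)).trans ?_
      have hk : (((ib.length + (fb.length + 1) : Nat) : Int) - ((ia.length + (fa.length + 1) : Nat) : Int)
          + (ia.length : Int) - (ib.length : Int)).toNat = fb.length - fa.length := by omega
      have hf1 : max fa.length fb.length - fa.length = fb.length - fa.length := by omega
      have hf2 : max fa.length fb.length - fb.length = 0 := by omega
      rw [hk, hf1, hf2]
      simp only [List.append_assoc, pv_val_zeros_append, pv_val_append, pv_val_zeros,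
        List.length_replicate, List.replicate_zero, List.append_nil, List.length_append]
      ring
    · simp only [List.length_append, List.length_replicate, List.length_cons]
      omega
  · simp only [if_neg hii, if_neg hff]
    refine pv_format' _ _ _ _ ?_ ?_
    · refine (pv_colsum _ _ _ _ (by simp; omega)).trans ?_
      have hk : (((ia.length + (fa.length + 1) : Nat) : Int) - ((ib.length + (fb.length + 1) : Nat) : Int)
          + (ib.length : Int) - (ia.length : Int)).toNat = fa.length - fb.length := by omega
      have hf1 : max fa.length fb.length - fa.length = 0 := by omega
      have hf2 : max fa.length fb.length - fb.length = fa.length - fb.length := by omega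
      rw [hk, hf1, hf2]
      simp only [List.append_assoc, pv_val_zeros_append, pv_val_append, pv_val_zeros,
        List.length_replicate, List.replicate_zero, List.append_nil, List.length_append]
      ring
    · simp only [List.length_append, List.length_replicate, List.length_cons]
      omega

-- the two adds agree on every input string (both traverse the very same digit lists)
theorem pv_add_eq (a b : String) : pvAdd a b = pvAddB a b := by
  rw [pv_add_tail a b, pv_addB_tail a b, pvParse_eq a, pvParse_eq b,
    pv_dotted_decomp (pvStrip a), pv_dotted_decomp (pvStrip b)]
  exact pv_core _ _ _ _ _ _ (pv_ip_no_dot _) (pv_ip_no_dot _)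

theorem pv_offset_eq (base p : List String) (hb : 2 ≤ base.length)
    (hp : 2 ≤ p.length) : pvOffset base p = pvOffsetB base p := by
  match p, hp with
  | x :: y :: t, _ =>
    match base, hb with
    | u :: v :: r, _ => simp [pvOffset, pvOffsetB, pv_add_eq]

theorem pv_offsetB_len (base p : List String) (_hp : 2 ≤ p.length) :
    2 ≤ (pvOffsetB base p).length := by
  simp [pvOffsetB]

theorem pv_ok_len (p : List String) (h : pvOkPair p = true) : 2 ≤ p.length := by
  simp [pvOkPair] at h; exact h.1.1

theorem pv_key (rest res : List (List String))
    (hbase : 3 ≤ rest.length → 2 ≤ (res.getLastD []).length)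
    (hok : ∀ p ∈ rest.take (3 * (rest.length / 3)), 2 ≤ p.length) :
    (rest.foldl pvStepA (res, [])).1 = res ++ pvGo rest (res.getLastD []) := by
  match rest with
  | [] => simp [pvGo]
  | [p1] => simp [pvGo, pvStepA]
  | [p1, p2] => simp [pvGo, pvStepA]
  | p1 :: p2 :: p3 :: rest' =>
    have hb2 : 2 ≤ (res.getLastD []).length := hbase (by simp)
    have hm : 3 * ((p1 :: p2 :: p3 :: rest').length / 3) = 3 * (rest'.length / 3) + 3 := by
      simp only [List.length_cons]; omega
    rw [hm] at hok
    have htk : (p1 :: p2 :: p3 :: rest').take (3 * (rest'.length / 3) + 3)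
        = p1 :: p2 :: p3 :: rest'.take (3 * (rest'.length / 3)) := by
      rw [show 3 * (rest'.length / 3) + 3 = (3 * (rest'.length / 3)).succ.succ.succ from rfl]
      simp [List.take_succ_cons]
    rw [htk] at hok
    have hp1 : 2 ≤ p1.length := hok p1 (by simp)
    have hp2 : 2 ≤ p2.length := hok p2 (by simp)
    have hp3 : 2 ≤ p3.length := hok p3 (by simp)
    have hok' : ∀ p ∈ rest'.take (3 * (rest'.length / 3)), 2 ≤ p.length := by
      intro q hmem; exact hok q (by simp; tauto)
    have h1 : pvStepA (res, []) p1 = (res, [p1]) := by simp [pvStepA]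
    have h2 : pvStepA (res, [p1]) p2 = (res, [p1, p2]) := by simp [pvStepA]
    have h3 : pvStepA (res, [p1, p2]) p3 =
        (res ++ [p1, p2, p3].map (pvOffset (res.getLastD [])), []) := by
      simp [pvStepA]
    have hmap : [p1, p2, p3].map (pvOffset (res.getLastD []))
        = [p1, p2, p3].map (pvOffsetB (res.getLastD [])) := by
      simp only [List.map_cons, List.map_nil, pv_offset_eq _ _ hb2 hp1,
        pv_offset_eq _ _ hb2 hp2, pv_offset_eq _ _ hb2 hp3]
    have he : (res ++ [p1, p2, p3].map (pvOffsetB (res.getLastD []))).getLastD [] =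
        ([p1, p2, p3].map (pvOffsetB (res.getLastD []))).getD 2 [] := by
      simp [List.getLastD_eq_getLast?, List.getLast?_append]
    have ih := pv_key rest' (res ++ [p1, p2, p3].map (pvOffsetB (res.getLastD [])))
      (fun _ => by rw [he]; exact pv_offsetB_len _ _ hp3) hok'
    have hgo : pvGo (p1 :: p2 :: p3 :: rest') (res.getLastD []) =
        [p1, p2, p3].map (pvOffsetB (res.getLastD [])) ++
          pvGo rest' (([p1, p2, p3].map (pvOffsetB (res.getLastD []))).getD 2 []) := by
      rw [pvGo]; simp
    simp only [List.foldl_cons, h1, h2, h3, hmap, ih, hgo, he, List.append_assoc]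
termination_by rest.length

-- ===== VERDICT (by name: the statement is the Claim_ definition above) =====
theorem explicitify_spec : Claim_equal_explicitify := by
  intro pairs _ hpre
  unfold Spec_explicitify
  obtain ⟨hne, hfirst, hrest⟩ := hpre
  match pairs with
  | [] => exact absurd rfl hne
  | p :: rest =>
    show (rest.foldl pvStepA ([p], [])).1 = p :: pvGo rest p
    have h := pv_key rest [p] (fun h3 => by
      exact pv_ok_len _ (by simpa using hfirst (by simpa using h3)))
      (fun q hq => pv_ok_len _ ((by simpa using hrest : ∀ q ∈ rest.take (3 * (rest.length / 3)), pvOkPair q = true) q hq))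
    simpa using h
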